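-- pv_equiv track=rewrite | github.com/LuGuangWang/python | ai/similar_word.py | same_word
-- ===== SOURCE A (Python) =====
-- def same_word(item, target):
--     item_val = str(item)
--     target_val = str(target)
--
--     if len(item_val) > len(target_val):
--         tmp = item_val
--         item_val = target_val
--         target_val = tmp
--
--     cnt = 0
--     for ch in item_val:
--         if ch in target_val:
--             cnt += 1
--     return cnt
-- ===== SOURCE B (Python) =====
-- def same_word(item, target):
--     item_val = str(item)
--     target_val = str(target)
--     if len(item_val) > len(target_val):
--         item_val, target_val = target_val, item_val
--     a = sorted(item_val)
--     b = sorted(set(target_val))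
--     cnt = 0
--     i = 0
--     j = 0
--     while i < len(a) and j < len(b):
--         if a[i] < b[j]:
--             i += 1
--         elif b[j] < a[i]:
--             j += 1
--         else:
--             cnt += 1
--             i += 1
--     return cnt
-- ===== Notes on version B (the rewrite author's own statement) =====
-- stated objective: alternative
-- what changed: Instead of scanning each character of the shorter string and testing membership in the longer one, B sorts the shorter string and the distinct characters of the longer string and counts matches with a two-pointer merge over the two sorted sequences.
import Mathlib
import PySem

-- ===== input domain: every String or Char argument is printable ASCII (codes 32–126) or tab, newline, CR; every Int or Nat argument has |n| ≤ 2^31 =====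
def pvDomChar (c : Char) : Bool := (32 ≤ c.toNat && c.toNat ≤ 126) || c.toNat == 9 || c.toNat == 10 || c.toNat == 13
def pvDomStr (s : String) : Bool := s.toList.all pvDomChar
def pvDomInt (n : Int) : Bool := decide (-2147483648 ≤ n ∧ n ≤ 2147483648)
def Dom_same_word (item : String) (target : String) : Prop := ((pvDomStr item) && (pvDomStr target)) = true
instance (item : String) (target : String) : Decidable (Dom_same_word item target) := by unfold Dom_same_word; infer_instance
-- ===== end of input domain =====

-- B replaces A's membership-scan count by sorting the shorter string and the
-- distinct characters of the longer one, then counting matches by a two-pointer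
-- merge (alternative algorithm, same result).

-- ===== PORT A =====
def same_word (item : String) (target : String) : Int :=
  let item_val := item
  let target_val := target
  -- if len(item_val) > len(target_val): swap
  let p := if PySem.Str.len item_val > PySem.Str.len target_val
           then (target_val, item_val) else (item_val, target_val)
  -- cnt = 0; for ch in item_val: if ch in target_val: cnt += 1
  p.1.toList.foldl (fun cnt ch => if p.2.toList.contains ch then cnt + 1 else cnt) (0 : Int)

-- ===== PORT B =====
-- while i < len(a) and j < len(b): advance the smaller head, count on equality
def swMerge : List Char → List Char → Int → Int
  | [], _, cnt => cnt
  | _ :: _, [], cnt => cnt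
  | x :: xs, y :: ys, cnt =>
    if x < y then swMerge xs (y :: ys) cnt
    else if y < x then swMerge (x :: xs) ys cnt
    else swMerge xs (y :: ys) (cnt + 1)

def same_word_alt (item : String) (target : String) : Int :=
  let item_val := item
  let target_val := target
  let p := if PySem.Str.len item_val > PySem.Str.len target_val
           then (target_val, item_val) else (item_val, target_val)
  -- a = sorted(item_val); b = sorted(set(target_val))
  let a := PySem.List.sorted p.1.toList (fun x => x) false
  let b := PySem.List.sorted (PySem.Set.ofList p.2.toList) (fun x => x) false
  swMerge a b 0

-- ===== PRECONDITION & SPEC =====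
def Spec_same_word (item : String) (target : String) (out : Int) : Prop := out = same_word_alt item target
instance (item : String) (target : String) (out : Int) : Decidable (Spec_same_word item target out) := by unfold Spec_same_word; infer_instance

-- ===== CLAIM =====
def Claim_equal_same_word : Prop := ∀ (item : String) (target : String), Dom_same_word item target → Spec_same_word item target (same_word item target)

-- ===== LEMMAS AND PROOFS =====

-- merge invariant: on a nondecreasing a and strictly increasing b,
-- the two-pointer merge counts the elements of a that occur in b
lemma swMerge_eq_countP (a b : List Char) (c : Int)
    (ha : a.Pairwise (· ≤ ·)) (hb : b.Pairwise (· < ·)) :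
    swMerge a b c = c + (a.countP (fun x => b.contains x) : Int) := by
  induction a, b, c using swMerge.induct with
  | case1 b c => simp [swMerge]
  | case2 x xs c => simp [swMerge]
  | case3 x xs y ys c hxy ih =>
    have h1 : x ≠ y := ne_of_lt hxy
    have h2 : x ∉ ys := fun h => absurd (List.rel_of_pairwise_cons hb h) (not_lt.mpr (le_of_lt hxy))
    rw [swMerge, if_pos hxy, ih ha.tail hb]
    simp [h1, h2]
  | case4 x xs y ys c hxy hyx ih =>
    have hcp : List.countP (fun z => (y :: ys).contains z) (x :: xs)
             = List.countP (fun z => ys.contains z) (x :: xs) := by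
      refine List.countP_congr (fun z hz => ?_)
      have hxz : x ≤ z := by
        rcases List.mem_cons.mp hz with h | h
        · exact h ▸ le_refl _
        · exact List.rel_of_pairwise_cons ha h
      have : z ≠ y := fun h => absurd (h ▸ hxz) (not_le.mpr hyx)
      simp [this]
    rw [swMerge, if_neg (asymm hyx), if_pos hyx, ih ha hb.tail]
    congr 1
    exact_mod_cast hcp.symm
  | case5 x xs y ys c hxy hyx ih =>
    have hxyeq : x = y := le_antisymm (not_lt.mp hyx) (not_lt.mp hxy)
    rw [swMerge, if_neg hxy, if_neg hyx, ih ha.tail hb]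
    simp [hxyeq]
    omega

-- both sides equal the count of characters of s occurring in t
lemma count_eq (s t : List Char) :
    swMerge (PySem.List.sorted s (fun x => x) false)
            (PySem.List.sorted (PySem.Set.ofList t) (fun x => x) false) 0
    = s.foldl (fun cnt ch => if t.contains ch then cnt + 1 else cnt) (0 : Int) := by
  rw [PySem.List.foldl_if_add_one, zero_add,
      swMerge_eq_countP _ _ _
        (by simpa using PySem.List.sorted_pairwise s (fun x => x))
        (PySem.List.sorted_ofList_pairwise_lt t),
      zero_add]
  congr 1
  rw [(PySem.List.sorted_perm s (fun x => x) false).countP_eq]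
  exact List.countP_congr (fun z _ => by
    simp [PySem.List.mem_sorted, PySem.Set.mem_ofList])

-- ===== VERDICT =====
theorem same_word_spec : Claim_equal_same_word := by
  intro item target _
  simp only [Spec_same_word, same_word, same_word_alt]
  split <;> exact (count_eq _ _).symm
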